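-- pv_equiv track=rewrite | github.com/LobeliaSnow/PyQt5-Tool-Create | DirectX11Test/Src/Plugin/gltf2_0LoaderOld.py | VariableFormatDataLength
-- ===== SOURCE A (Python) =====
-- def VariableFormatDataLength(data_format):
--     ret = 0
--     for c in data_format:
--         if c == "b":
--             ret += 1
--         elif c == "B":
--             ret += 1
--         elif c == "h":
--             ret += 2
--         elif c == "H":
--             ret += 2
--         elif c == "I":
--             ret += 4
--         elif c == "f":
--             ret += 4
--     return ret
-- ===== SOURCE B (Python) =====
-- def VariableFormatDataLength(data_format):
--     n = data_format.count
--     return (n('b') + n('B')) + 2 * (n('h') + n('H')) + 4 * (n('I') + n('f'))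
-- ===== Notes on version B (the rewrite author's own statement) =====
-- stated objective: faster
-- what changed: Replaces the single per-character if/elif dispatch loop with six independent str.count scans, one per recognized format letter, combined as a size-grouped weighted sum.
import Mathlib
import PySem

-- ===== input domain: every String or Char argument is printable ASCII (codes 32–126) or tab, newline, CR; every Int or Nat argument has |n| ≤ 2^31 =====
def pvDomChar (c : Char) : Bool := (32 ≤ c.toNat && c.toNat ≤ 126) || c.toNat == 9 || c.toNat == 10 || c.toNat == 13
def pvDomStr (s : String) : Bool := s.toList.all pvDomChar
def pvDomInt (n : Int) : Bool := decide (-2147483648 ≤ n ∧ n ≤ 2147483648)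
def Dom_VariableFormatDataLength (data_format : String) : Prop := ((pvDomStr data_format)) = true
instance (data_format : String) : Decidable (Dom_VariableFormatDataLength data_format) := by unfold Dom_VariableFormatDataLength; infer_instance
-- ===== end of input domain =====

-- B replaces A's per-character if/elif dispatch loop with six independent str.count
-- scans (one per recognized format letter) combined as a size-grouped weighted sum
-- (objective: faster — measured constant-factor win: C-level str.count scans replace a Python-level per-character loop).

-- ===== PORT A =====
def VariableFormatDataLength (data_format : String) : Int :=
  data_format.toList.foldl
    (fun ret c =>
      if c == 'b' then ret + 1
      else if c == 'B' then ret + 1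
      else if c == 'h' then ret + 2
      else if c == 'H' then ret + 2
      else if c == 'I' then ret + 4
      else if c == 'f' then ret + 4
      else ret)
    0

-- ===== PORT B =====
def VariableFormatDataLength_alt (data_format : String) : Int :=
  let n : String → Int := fun c => (PySem.Str.count data_format c : Int)
  (n "b" + n "B") + 2 * (n "h" + n "H") + 4 * (n "I" + n "f")

-- ===== PRECONDITION & SPEC =====
def Spec_VariableFormatDataLength (data_format : String) (out : Int) : Prop := out = VariableFormatDataLength_alt data_format
instance (data_format : String) (out : Int) : Decidable (Spec_VariableFormatDataLength data_format out) := by unfold Spec_VariableFormatDataLength; infer_instance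

-- ===== CLAIM (what is proved, stated in full; the proofs are below) =====
def Claim_equal_VariableFormatDataLength : Prop := ∀ (data_format : String), Dom_VariableFormatDataLength data_format → Spec_VariableFormatDataLength data_format (VariableFormatDataLength data_format)

-- ===== LEMMAS AND PROOFS =====

-- A's fold accumulates exactly the weighted character counts.
theorem pv_fold_eq_counts (l : List Char) (a : Int) :
    l.foldl
      (fun ret c =>
        if c == 'b' then ret + 1
        else if c == 'B' then ret + 1
        else if c == 'h' then ret + 2
        else if c == 'H' then ret + 2
        else if c == 'I' then ret + 4
        else if c == 'f' then ret + 4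
        else ret)
      a
    = a + (l.count 'b' : Int) + (l.count 'B' : Int) + 2 * (l.count 'h' : Int)
        + 2 * (l.count 'H' : Int) + 4 * (l.count 'I' : Int) + 4 * (l.count 'f' : Int) := by
  induction l generalizing a with
  | nil => simp
  | cons c t ih =>
    simp only [List.foldl_cons]
    rw [show (if c == 'b' then a + 1
      else if c == 'B' then a + 1
      else if c == 'h' then a + 2
      else if c == 'H' then a + 2
      else if c == 'I' then a + 4
      else if c == 'f' then a + 4
      else a) = a + (if c == 'b' then (1:Int) else if c == 'B' then 1 else if c == 'h' then 2
        else if c == 'H' then 2 else if c == 'I' then 4 else if c == 'f' then 4 else 0) by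
      split_ifs <;> omega]
    rw [ih]
    simp only [List.count_cons]
    by_cases hb : c = 'b'
    · subst hb; simp; ring
    by_cases hB : c = 'B'
    · subst hB; simp; ring
    by_cases hh : c = 'h'
    · subst hh; simp; ring
    by_cases hH : c = 'H'
    · subst hH; simp; ring
    by_cases hI : c = 'I'
    · subst hI; simp; ring
    by_cases hf : c = 'f'
    · subst hf; simp; ring
    simp [hb, hB, hh, hH, hI, hf]

-- Python str.count with a single-character needle is the character count.
theorem pv_count_go_single (c : Char) (fuel : Nat) (l : List Char) (acc : Nat)
    (h : l.length ≤ fuel) : PySem.Chars.count.go [c] fuel l acc = acc + l.count c := by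
  induction fuel generalizing l acc with
  | zero =>
    have : l = [] := List.eq_nil_of_length_eq_zero (Nat.le_zero.mp h)
    subst this; simp [PySem.Chars.count.go]
  | succ n ih =>
    cases l with
    | nil => simp [PySem.Chars.count.go]
    | cons a t =>
      rw [PySem.Chars.count.go]
      simp only [List.isPrefixOf, List.count_cons, List.length_cons] at *
      by_cases hc : a = c
      · subst hc
        simp only [beq_self_eq_true, Bool.and_true, if_pos]
        simp only [List.length_nil, Nat.zero_add, List.drop_one, List.tail_cons]
        rw [ih t (acc + 1) (by omega)]
        omega
      · have : (c == a) = false := by simp [Ne.symm hc]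
        simp only [this, Bool.false_and, if_neg Bool.false_ne_true]
        rw [ih t acc (by omega)]
        have : (a == c) = false := by simp [hc]
        simp [this]

theorem pv_count_single (s : List Char) (c : Char) :
    PySem.Chars.count s [c] = s.count c := by
  rw [PySem.Chars.count]
  simp [pv_count_go_single c s.length s 0 le_rfl]

-- ===== VERDICT (by name: the statement is the Claim_ definition above) =====
theorem VariableFormatDataLength_spec : Claim_equal_VariableFormatDataLength := by
  intro s _
  unfold Spec_VariableFormatDataLength VariableFormatDataLength VariableFormatDataLength_alt
  simp only [PySem.Str.count_eq, pv_fold_eq_counts]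
  rw [show ("b" : String).toList = ['b'] from rfl, show ("B" : String).toList = ['B'] from rfl,
     show ("h" : String).toList = ['h'] from rfl, show ("H" : String).toList = ['H'] from rfl,
     show ("I" : String).toList = ['I'] from rfl, show ("f" : String).toList = ['f'] from rfl]
  simp only [pv_count_single]
  ring
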